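-- pv_equiv track=rewrite | github.com/KotKaro/ProjectEuler-Python | problems/Problem788/problem.py | is_dominating_number
-- ===== SOURCE A (Python) =====
-- def is_dominating_number(number: int):
--     string_number = str(number)
--     string_number_half_length = len(string_number) / 2
--     keys_dictionary = {}
--     for char in string_number:
--         if char in keys_dictionary:
--             keys_dictionary[char] = keys_dictionary[char] + 1
--         else:
--             keys_dictionary[char] = 1
--         if keys_dictionary[char] > string_number_half_length:
--             return True
--
--     return False
-- ===== SOURCE B (Python) =====
-- def is_dominating_number(number: int):
--     # Sort-then-median: a character occurring in more than half the positions
--     # must sit at the middle index of the sorted character list, so it is the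
--     # only candidate; one count verifies it.
--     digits = sorted(str(number))
--     candidate = digits[len(digits) // 2]
--     return digits.count(candidate) > len(digits) / 2
-- ===== Notes on version B (the rewrite author's own statement) =====
-- stated objective: alternative
-- what changed: Replaces A's fused loop (incrementally maintained dict of running counts with an in-loop threshold check and early return) by a sort-based majority test: sort the character list, pick the middle element as the only possible majority candidate, and verify it with a single count.
import Mathlib
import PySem

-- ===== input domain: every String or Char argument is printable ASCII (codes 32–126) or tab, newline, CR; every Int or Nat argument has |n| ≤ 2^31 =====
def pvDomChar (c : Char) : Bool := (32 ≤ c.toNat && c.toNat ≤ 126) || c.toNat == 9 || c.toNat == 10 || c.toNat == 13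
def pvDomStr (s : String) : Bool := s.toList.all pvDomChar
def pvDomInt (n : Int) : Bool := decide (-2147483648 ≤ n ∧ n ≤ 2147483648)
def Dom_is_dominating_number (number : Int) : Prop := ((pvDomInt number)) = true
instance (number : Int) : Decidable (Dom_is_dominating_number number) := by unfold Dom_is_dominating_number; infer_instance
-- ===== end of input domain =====

-- B replaces A's fused dict-of-running-counts loop (early return on threshold)
-- by a sort-based majority test: sort the characters, the middle element of the
-- sorted list is the only possible majority candidate, verify it with one count.

-- ===== PORT A =====
-- A's for-loop over the characters: dict of running counts, early `return True`
-- when the just-updated count exceeds len/2.  The Python comparison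
-- `count > len/2` (float) is exact for integers: it is `2*count > len`.
def isDomLoopA (L : Nat) : List Char → PySem.Dict Char Int → Bool
  | [], _ => false
  | c :: cs, d =>
    let d' := if d.contains c then d.insert c (d.getD c 0 + 1) else d.insert c 1
    if 2 * d'.getD c 0 > (L : Int) then true else isDomLoopA L cs d'

def is_dominating_number (number : Int) : Bool :=
  let s := (PySem.Int.toStr number).toList
  isDomLoopA s.length s PySem.Dict.empty

-- ===== PORT B =====
-- sorted(str(number)); digits[len//2] via pyGet? (none is unreachable: str(number)
-- is never empty, the `none => false` arm only totalises the match);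
-- `count > len/2` (float) ported exactly as `2*count > len`.
def is_dominating_number_alt (number : Int) : Bool :=
  let digits := PySem.List.sorted (PySem.Int.toStr number).toList (fun c => c) false
  match PySem.List.pyGet? digits (PySem.Int.floordiv (digits.length : Int) 2) with
  | some candidate => decide (2 * digits.count candidate > digits.length)
  | none => false

-- ===== PRECONDITION & SPEC =====
def Spec_is_dominating_number (number : Int) (out : Bool) : Prop := out = is_dominating_number_alt number
instance (number : Int) (out : Bool) : Decidable (Spec_is_dominating_number number out) := by unfold Spec_is_dominating_number; infer_instance

-- ===== CLAIM (what is proved, stated in full; the proofs are below) =====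
def Claim_equal_is_dominating_number : Prop := ∀ (number : Int), Dom_is_dominating_number number → Spec_is_dominating_number number (is_dominating_number number)

-- ===== LEMMAS AND PROOFS =====

-- Invariant of A's loop: it fires iff some character of the remaining suffix has
-- (count carried in the dict) + (occurrences in the suffix) above the threshold.
lemma isDomLoopA_iff (L : Nat) (rest : List Char) :
    ∀ d : PySem.Dict Char Int,
      isDomLoopA L rest d
        = rest.any (fun c => 2 * (d.getD c 0 + rest.count c) > (L : Int)) := by
  induction rest with
  | nil => intro d; simp [isDomLoopA]
  | cons c cs ih =>
    intro d
    have hd' : (if d.contains c then d.insert c (d.getD c 0 + 1) else d.insert c 1)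
        = d.insert c (d.getD c 0 + 1) := by
      by_cases h : d.contains c
      · simp [h]
      · simp only [Bool.not_eq_true] at h
        rw [if_neg (by simp [h]), PySem.Dict.getD_of_not_contains d (0 : Int) h]
        norm_num
    rw [isDomLoopA, hd', PySem.Dict.getD_insert_self]
    by_cases hfire : 2 * (d.getD c 0 + 1) > (L : Int)
    · rw [if_pos hfire]
      symm
      rw [List.any_eq_true]
      refine ⟨c, List.mem_cons_self, ?_⟩
      rw [decide_eq_true_eq, List.count_cons_self]
      push_cast
      omega
    · rw [if_neg hfire, ih, Bool.eq_iff_iff]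
      simp only [List.any_cons, List.any_eq_true, Bool.or_eq_true, decide_eq_true_eq]
      constructor
      · rintro ⟨x, hx, hgt⟩
        right
        refine ⟨x, hx, ?_⟩
        by_cases hxc : x = c
        · subst hxc
          rw [PySem.Dict.getD_insert_self] at hgt
          rw [List.count_cons_self]
          push_cast at hgt ⊢
          omega
        · rw [PySem.Dict.getD_insert_of_ne d _ _ hxc] at hgt
          have hc : (c :: cs).count x = cs.count x := by
            simp [Ne.symm hxc]
          rw [hc]
          exact hgt
      · rintro (hgt | ⟨x, hx, hgt⟩)
        · rw [List.count_cons_self] at hgt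
          by_cases hmem : c ∈ cs
          · refine ⟨c, hmem, ?_⟩
            rw [PySem.Dict.getD_insert_self]
            push_cast at hgt ⊢
            omega
          · rw [List.count_eq_zero.mpr hmem] at hgt
            exfalso
            push_cast at hgt
            omega
        · refine ⟨x, hx, ?_⟩
          by_cases hxc : x = c
          · subst hxc
            rw [PySem.Dict.getD_insert_self]
            rw [List.count_cons_self] at hgt
            push_cast at hgt ⊢
            omega
          · rw [PySem.Dict.getD_insert_of_ne d _ _ hxc]
            have hc : (c :: cs).count x = cs.count x := by
              simp [Ne.symm hxc]
            rw [hc] at hgt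
            exact hgt

-- In a ≤-sorted list, a strict-majority element sits at the middle index.
lemma majority_at_median (s : List Char) (hp : s.Pairwise (· ≤ ·)) (c : Char)
    (hc : s.length < 2 * s.count c) (hmid : s.length / 2 < s.length) :
    s[s.length / 2] = c := by
  set n := s.length with hn
  set j := n / 2 with hj
  have hmono : ∀ (i k : Nat) (hi : i < n) (hk : k < n), i ≤ k → s[i] ≤ s[k] := by
    intro i k hi hk hik
    rcases Nat.eq_or_lt_of_le hik with rfl | h
    · exact le_refl _
    · exact List.pairwise_iff_getElem.mp hp i k hi hk h
  rcases lt_trichotomy s[j] c with hlt | heq | hgt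
  · -- s[j] < c : every occurrence of c lies strictly after index j
    exfalso
    have htk : c ∉ s.take (j + 1) := by
      intro hmem
      obtain ⟨i, hi, hsi⟩ := List.mem_iff_getElem.mp hmem
      rw [List.getElem_take] at hsi
      have hilen := hi
      rw [List.length_take] at hilen
      have hi' : i < n := by omega
      have hij : i ≤ j := by omega
      have := hmono i j hi' hmid hij
      rw [hsi] at this
      exact absurd (lt_of_le_of_lt this hlt) (lt_irrefl c)
    have hsplit : s.count c = (s.take (j + 1)).count c + (s.drop (j + 1)).count c := by
      conv_lhs => rw [← List.take_append_drop (j + 1) s]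
      exact List.count_append ..
    have h0 : (s.take (j + 1)).count c = 0 := List.count_eq_zero.mpr htk
    have hle : (s.drop (j + 1)).count c ≤ n - (j + 1) := by
      calc (s.drop (j + 1)).count c ≤ (s.drop (j + 1)).length := List.count_le_length
        _ = n - (j + 1) := by simp [hn]
    omega
  · exact heq
  · -- c < s[j] : every occurrence of c lies strictly before index j
    exfalso
    have hdr : c ∉ s.drop j := by
      intro hmem
      obtain ⟨i, hi, hsi⟩ := List.mem_iff_getElem.mp hmem
      rw [List.getElem_drop] at hsi
      have hilen := hi
      rw [List.length_drop] at hilen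
      have hji : j + i < n := by omega
      have := hmono j (j + i) hmid hji (by omega)
      rw [hsi] at this
      exact absurd (lt_of_lt_of_le hgt this) (lt_irrefl c)
    have hsplit : s.count c = (s.take j).count c + (s.drop j).count c := by
      conv_lhs => rw [← List.take_append_drop j s]
      exact List.count_append ..
    have h0 : (s.drop j).count c = 0 := List.count_eq_zero.mpr hdr
    have hle : (s.take j).count c ≤ j := by
      calc (s.take j).count c ≤ (s.take j).length := List.count_le_length
        _ ≤ j := by simp
    omega

-- Core equivalence on an arbitrary character list.
lemma any_majority_eq_median_test (s0 : List Char) :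
    (s0.any (fun c => 2 * ((0 : Int) + s0.count c) > (s0.length : Int)))
      = (match PySem.List.pyGet? (PySem.List.sorted s0 (fun c => c) false)
              (PySem.Int.floordiv (((PySem.List.sorted s0 (fun c => c) false).length : Int)) 2) with
         | some candidate => decide (2 * (PySem.List.sorted s0 (fun c => c) false).count candidate
              > (PySem.List.sorted s0 (fun c => c) false).length)
         | none => false) := by
  set s := PySem.List.sorted s0 (fun c => c) false with hs
  have hperm : s.Perm s0 := PySem.List.sorted_perm ..
  have hlen : s.length = s0.length := hperm.length_eq
  have hcnt : ∀ c, s.count c = s0.count c := fun c => hperm.count_eq c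
  have hpw : s.Pairwise (· ≤ ·) := PySem.List.sorted_pairwise ..
  have hidx : PySem.Int.floordiv ((s.length : Int)) 2 = ((s.length / 2 : Nat) : Int) := by
    exact_mod_cast PySem.Int.floordiv_natCast s.length 2
  rw [hidx, PySem.List.pyGet?_natCast]
  rcases Nat.eq_zero_or_pos s.length with h0 | hpos
  · have hs0 : s0 = [] := List.eq_nil_of_length_eq_zero (by omega)
    have hsnil : s = [] := List.eq_nil_of_length_eq_zero h0
    simp [hs0, hsnil]
  · have hmid : s.length / 2 < s.length := Nat.div_lt_self hpos (by omega)
    rw [List.getElem?_eq_getElem hmid]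
    rw [Bool.eq_iff_iff]
    simp only [List.any_eq_true, decide_eq_true_eq]
    constructor
    · rintro ⟨c, hcmem, hgt⟩
      have h1 : s0.length < 2 * s0.count c := by omega
      have hgtn : s.length < 2 * s.count c := by rw [hlen, hcnt c]; exact h1
      rw [majority_at_median s hpw c hgtn hmid]
      omega
    · intro hgt
      refine ⟨s[s.length / 2], hperm.mem_iff.mp (List.getElem_mem hmid), ?_⟩
      rw [← hcnt, ← hlen]
      omega

-- ===== VERDICT (by name: the statement is the Claim_ definition above) =====
theorem is_dominating_number_spec : Claim_equal_is_dominating_number := by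
  intro number _
  unfold Spec_is_dominating_number is_dominating_number is_dominating_number_alt
  rw [isDomLoopA_iff]
  have h := any_majority_eq_median_test (PySem.Int.toStr number).toList
  simp only [PySem.Dict.getD_empty] at h ⊢
  exact h
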